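-- pv_equiv track=rewrite | github.com/matirowensztein/practicas-ip | ROWEN/parciales/Parcial5.py | torneo_de_gallinas
-- ===== SOURCE A (Python) =====
-- def torneo_de_gallinas(estrategias: dict[str, str]) -> dict[str, int]:
--     puntaje_jugadores: dict[str, int] = {}
--     comportamiento_gallina: str = "me desvio siempre"
--     comportamiento_valiente: str = "me la banco y no me desvio"
--
--     for jugador in estrategias:
--         puntaje_jugadores[jugador] = 0
--
--         for j in estrategias.keys():
--             if j != jugador:
--                 if (
--                     estrategias[j] == comportamiento_valiente
--                     and estrategias[jugador] == comportamiento_valiente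
--                 ):
--                     puntaje_jugadores[jugador] -= 5
--
--                 if (
--                     estrategias[j] == comportamiento_gallina
--                     and estrategias[jugador] == comportamiento_gallina
--                 ):
--                     puntaje_jugadores[jugador] -= 10
--
--                 if (
--                     estrategias[j] == comportamiento_gallina
--                     and estrategias[jugador] == comportamiento_valiente
--                 ):
--                     puntaje_jugadores[jugador] += 10
--
--                 if (
--                     estrategias[j] == comportamiento_valiente
--                     and estrategias[jugador] == comportamiento_gallina
--                 ):
--                     puntaje_jugadores[jugador] -= 15
--
--     return puntaje_jugadores
-- ===== SOURCE B (Python) =====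
-- def torneo_de_gallinas(estrategias: dict[str, str]) -> dict[str, int]:
--     gallina = "me desvio siempre"
--     valiente = "me la banco y no me desvio"
--     v = sum(1 for s in estrategias.values() if s == valiente)
--     g = sum(1 for s in estrategias.values() if s == gallina)
--
--     def puntaje(s: str) -> int:
--         if s == valiente:
--             return -5 * (v - 1) + 10 * g
--         if s == gallina:
--             return -10 * (g - 1) - 15 * v
--         return 0
--
--     return {jugador: puntaje(s) for jugador, s in estrategias.items()}
-- ===== Notes on version B (the rewrite author's own statement) =====
-- stated objective: faster
-- what changed: Replaced the all-pairs double loop with a single pass that counts the two strategies once and computes every player's score from those counts by a closed formula.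
import Mathlib
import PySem

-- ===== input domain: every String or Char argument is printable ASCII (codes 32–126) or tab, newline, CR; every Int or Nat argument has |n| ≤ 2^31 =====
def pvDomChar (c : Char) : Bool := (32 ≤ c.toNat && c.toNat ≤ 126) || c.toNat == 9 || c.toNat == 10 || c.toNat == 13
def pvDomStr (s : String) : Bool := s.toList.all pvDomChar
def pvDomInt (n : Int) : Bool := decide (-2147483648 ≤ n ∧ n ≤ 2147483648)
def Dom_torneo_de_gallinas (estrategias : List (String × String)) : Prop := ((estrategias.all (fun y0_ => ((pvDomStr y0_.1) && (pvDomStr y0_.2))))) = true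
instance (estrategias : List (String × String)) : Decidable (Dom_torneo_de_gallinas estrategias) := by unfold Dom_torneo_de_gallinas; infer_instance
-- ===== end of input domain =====

-- B replaces A's all-pairs double loop by counting the two strategies once and scoring each player by a closed formula (faster).


-- the two behaviour strings used by both programs
def gallinaStr : String := "me desvio siempre"
def valienteStr : String := "me la banco y no me desvio"

-- ===== PORT A =====
-- literal port of A: the association list denotes the Python dict (Dict.ofList), then the
-- nested loop over its keys with the four conditional score updates, exactly as in A.
def torneo_de_gallinas (estrategias : List (String × String)) : List (String × Int) :=
  let est := PySem.Dict.ofList estrategias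
  let final := est.keys.foldl (fun punt jugador =>
    let punt1 := punt.insert jugador 0
    est.keys.foldl (fun p j =>
      if j ≠ jugador then
        let p := if est.getD j "" = valienteStr ∧ est.getD jugador "" = valienteStr then
                   p.modify jugador 0 (fun x => x - 5) else p
        let p := if est.getD j "" = gallinaStr ∧ est.getD jugador "" = gallinaStr then
                   p.modify jugador 0 (fun x => x - 10) else p
        let p := if est.getD j "" = gallinaStr ∧ est.getD jugador "" = valienteStr then
                   p.modify jugador 0 (fun x => x + 10) else p
        let p := if est.getD j "" = valienteStr ∧ est.getD jugador "" = gallinaStr then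
                   p.modify jugador 0 (fun x => x - 15) else p
        p
      else p) punt1) PySem.Dict.empty
  final.items

-- ===== PORT B =====
-- literal port of B: count the two strategies once, then map a closed-form score over the dict.
def torneo_de_gallinas_alt (estrategias : List (String × String)) : List (String × Int) :=
  let est := PySem.Dict.ofList estrategias
  let v : Int := est.values.count valienteStr
  let g : Int := est.values.count gallinaStr
  est.items.map (fun p =>
    (p.1, if p.2 = valienteStr then -5 * (v - 1) + 10 * g
          else if p.2 = gallinaStr then -10 * (g - 1) - 15 * v
          else 0))

-- ===== PRECONDITION & SPEC =====
def Spec_torneo_de_gallinas (estrategias : List (String × String)) (out : List (String × Int)) : Prop := out = torneo_de_gallinas_alt estrategias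
instance (estrategias : List (String × String)) (out : List (String × Int)) : Decidable (Spec_torneo_de_gallinas estrategias out) := by unfold Spec_torneo_de_gallinas; infer_instance

-- ===== CLAIM (what is proved, stated in full; the proofs are below) =====
def Claim_equal_torneo_de_gallinas : Prop := ∀ (estrategias : List (String × String)), Dom_torneo_de_gallinas estrategias → Spec_torneo_de_gallinas estrategias (torneo_de_gallinas estrategias)

-- ===== LEMMAS AND PROOFS =====

def contrib (sv sj : String) : Int :=
  (if sv = valienteStr ∧ sj = valienteStr then -5 else 0) +
  (if sv = gallinaStr ∧ sj = gallinaStr then -10 else 0) +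
  (if sv = gallinaStr ∧ sj = valienteStr then 10 else 0) +
  (if sv = valienteStr ∧ sj = gallinaStr then -15 else 0)

def score (est : PySem.Dict String String) (jugador : String) : Int :=
  (est.keys.map (fun j => if j = jugador then 0 else contrib (est.getD j "") (est.getD jugador ""))).sum

def istep (est : PySem.Dict String String) (jugador : String)
    (p : PySem.Dict String Int) (j : String) : PySem.Dict String Int :=
  if j ≠ jugador then
    let p := if est.getD j "" = valienteStr ∧ est.getD jugador "" = valienteStr then
               p.modify jugador 0 (fun x => x - 5) else p
    let p := if est.getD j "" = gallinaStr ∧ est.getD jugador "" = gallinaStr then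
               p.modify jugador 0 (fun x => x - 10) else p
    let p := if est.getD j "" = gallinaStr ∧ est.getD jugador "" = valienteStr then
               p.modify jugador 0 (fun x => x + 10) else p
    let p := if est.getD j "" = valienteStr ∧ est.getD jugador "" = gallinaStr then
               p.modify jugador 0 (fun x => x - 15) else p
    p
  else p

theorem dict_insert_getD_self {ν : Type} (d : PySem.Dict String ν) (k : String) (d0 : ν)
    (hnd : d.keys.Nodup) (h : k ∈ d.keys) : d.insert k (d.getD k d0) = d := by
  apply PySem.Dict.ext
  rw [PySem.Dict.items_insert_of_contains _ _ ((PySem.Dict.contains_iff_mem_keys d k).mpr h)]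
  have : ∀ p ∈ d.items, (if (p.1 == k) = true then (k, d.getD k d0) else p) = p := by
    intro p hp
    split
    · next heq =>
      have hk : p.1 = k := by simpa using heq
      have : d.getD k d0 = p.2 := by
        apply PySem.Dict.getD_of_mem_items _ _ hnd
        rw [← hk]; exact hp
      rw [this, ← hk]
    · rfl
  rw [List.map_congr_left this]; simp

theorem dict_modify_modify (d : PySem.Dict String Int) (k : String) (f g : Int → Int) :
    (d.modify k 0 f).modify k 0 g = d.modify k 0 (fun x => g (f x)) := by
  simp [PySem.Dict.modify, PySem.Dict.getD_insert_self, PySem.Dict.insert_insert_self]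

theorem dict_modify_zero (d : PySem.Dict String Int) (k : String)
    (hnd : d.keys.Nodup) (h : k ∈ d.keys) : d.modify k 0 (fun x => x + 0) = d := by
  simp only [PySem.Dict.modify, add_zero]
  exact dict_insert_getD_self d k 0 hnd h

theorem istep_eq (est : PySem.Dict String String) (jugador : String)
    (p : PySem.Dict String Int) (j : String) (hnd : p.keys.Nodup) (h : jugador ∈ p.keys) :
    istep est jugador p j = p.modify jugador 0
      (fun x => x + (if j = jugador then 0 else contrib (est.getD j "") (est.getD jugador ""))) := by
  by_cases hj : j = jugador
  · simp only [istep, hj, ne_eq, not_true_eq_false, if_false]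
    exact (dict_modify_zero p jugador hnd h).symm
  · have hvg : valienteStr ≠ gallinaStr := by decide
    have hgv : gallinaStr ≠ valienteStr := by decide
    simp only [istep, ne_eq, hj, not_false_eq_true, if_true, contrib]
    by_cases a1 : est.getD j "" = valienteStr <;> by_cases a2 : est.getD j "" = gallinaStr <;>
      by_cases b1 : est.getD jugador "" = valienteStr <;>
      by_cases b2 : est.getD jugador "" = gallinaStr <;>
      first
        | exact absurd (a1.symm.trans a2) hvg
        | exact absurd (b1.symm.trans b2) hvg
        | (simp only [a1, a2, b1, b2, hvg, hgv, and_self, and_true, and_false,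
             reduceIte]
           first
             | (simp only [PySem.Dict.modify]; exact congrArg (p.insert jugador) (by omega))
             | (simp only [add_zero, PySem.Dict.modify]
                exact (dict_insert_getD_self p jugador 0 hnd h).symm))

theorem inner_fold (est : PySem.Dict String String) (jugador : String) (l : List String)
    (p : PySem.Dict String Int) (hnd : p.keys.Nodup) (h : jugador ∈ p.keys) :
    l.foldl (istep est jugador) p = p.modify jugador 0
      (fun x => x + (l.map (fun j => if j = jugador then 0
        else contrib (est.getD j "") (est.getD jugador ""))).sum) := by
  induction l generalizing p with
  | nil =>
    simp only [List.foldl_nil, List.map_nil, List.sum_nil]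
    exact (dict_modify_zero p jugador hnd h).symm
  | cons j l ih =>
    rw [List.foldl_cons, istep_eq est jugador p j hnd h,
      ih _ (by simpa [PySem.Dict.modify] using PySem.Dict.nodup_keys_insert _ _ _ hnd)
        (by simp [PySem.Dict.modify, PySem.Dict.mem_keys_insert]),
      dict_modify_modify]
    simp only [List.map_cons, List.sum_cons]
    exact congrArg (fun f => PySem.Dict.modify p jugador 0 f) (by funext x; ring)

def ostep (est : PySem.Dict String String) (punt : PySem.Dict String Int)
    (jugador : String) : PySem.Dict String Int :=
  let punt1 := punt.insert jugador 0
  est.keys.foldl (fun p j =>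
    if j ≠ jugador then
      let p := if est.getD j "" = valienteStr ∧ est.getD jugador "" = valienteStr then
                 p.modify jugador 0 (fun x => x - 5) else p
      let p := if est.getD j "" = gallinaStr ∧ est.getD jugador "" = gallinaStr then
                 p.modify jugador 0 (fun x => x - 10) else p
      let p := if est.getD j "" = gallinaStr ∧ est.getD jugador "" = valienteStr then
                 p.modify jugador 0 (fun x => x + 10) else p
      let p := if est.getD j "" = valienteStr ∧ est.getD jugador "" = gallinaStr then
                 p.modify jugador 0 (fun x => x - 15) else p
      p
    else p) punt1

theorem ostep_eq (est : PySem.Dict String String) (punt : PySem.Dict String Int)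
    (jugador : String) (hnd : punt.keys.Nodup) :
    ostep est punt jugador = punt.insert jugador (score est jugador) := by
  show est.keys.foldl (istep est jugador) (punt.insert jugador 0) = _
  rw [inner_fold est jugador est.keys (punt.insert jugador 0)
      (PySem.Dict.nodup_keys_insert _ _ _ hnd)
      ((PySem.Dict.mem_keys_insert _ _ _ _).mpr (Or.inl rfl))]
  simp only [PySem.Dict.modify, PySem.Dict.getD_insert_self, PySem.Dict.insert_insert_self,
    zero_add, score]

theorem outer_fold (est : PySem.Dict String String) (l : List String)
    (acc : PySem.Dict String Int) (hnd : acc.keys.Nodup) (hl : l.Nodup)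
    (hdisj : ∀ j ∈ l, j ∉ acc.keys) :
    (l.foldl (ostep est) acc).items = acc.items ++ l.map (fun jug => (jug, score est jug)) := by
  induction l generalizing acc with
  | nil => simp
  | cons jug l ih =>
    rw [List.foldl_cons, ostep_eq est acc jug hnd,
      ih _ (PySem.Dict.nodup_keys_insert _ _ _ hnd)
        hl.of_cons
        (by
          intro j hj hmem
          rcases (PySem.Dict.mem_keys_insert _ _ _ _).mp hmem with h1 | h1
          · exact (List.nodup_cons.mp hl).1 (h1 ▸ hj)
          · exact hdisj j (List.mem_cons_of_mem _ hj) h1),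
      PySem.Dict.items_insert_of_not_contains _ _
        (by
          rcases hc : acc.contains jug with _ | _
          · rfl
          · exact absurd ((PySem.Dict.contains_iff_mem_keys _ _).mp hc)
              (hdisj jug (List.mem_cons_self) ))]
    simp

theorem sum_if_self {α : Type} [DecidableEq α] (l : List α) (hl : l.Nodup) (a : α)
    (ha : a ∈ l) (h : α → Int) :
    (l.map (fun j => if j = a then 0 else h j)).sum = (l.map h).sum - h a := by
  induction l with
  | nil => cases ha
  | cons b l ih =>
    rcases List.nodup_cons.mp hl with ⟨hb, hl'⟩
    simp only [List.map_cons, List.sum_cons]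
    rcases List.mem_cons.mp ha with rfl | ha'
    · rw [if_pos rfl, List.map_congr_left (fun j hj => if_neg (fun e : j = a => hb (e ▸ hj)))]
      ring
    · rw [if_neg (fun e : b = a => hb (e ▸ ha')), ih hl' ha']
      ring

theorem sum_contrib (L : List String) (sj : String) :
    (L.map (fun s => contrib s sj)).sum =
      (L.count valienteStr : Int) * contrib valienteStr sj +
      (L.count gallinaStr : Int) * contrib gallinaStr sj := by
  induction L with
  | nil => simp
  | cons s L ih =>
    simp only [List.map_cons, List.sum_cons, List.count_cons, ih]
    by_cases h1 : s = valienteStr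
    · subst h1
      have : (valienteStr == gallinaStr) = false := by decide
      simp [this]
      ring
    · by_cases h2 : s = gallinaStr
      · subst h2
        have : (gallinaStr == valienteStr) = false := by decide
        simp [this]
        ring
      · have hc : contrib s sj = 0 := by
          simp [contrib, h1, h2]
        have e1 : (s == valienteStr) = false := by simpa using h1
        have e2 : (s == gallinaStr) = false := by simpa using h2
        simp [hc, e1, e2]

theorem score_closed (est : PySem.Dict String String) (hnd : est.keys.Nodup)
    (jug : String) (hj : jug ∈ est.keys) :
    score est jug =
      (if est.getD jug "" = valienteStr then
        -5 * ((est.values.count valienteStr : Int) - 1) + 10 * (est.values.count gallinaStr : Int)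
      else if est.getD jug "" = gallinaStr then
        -10 * ((est.values.count gallinaStr : Int) - 1) - 15 * (est.values.count valienteStr : Int)
      else 0) := by
  have hv : est.values = est.keys.map (fun k => est.getD k "") :=
    PySem.Dict.values_eq_map_keys est hnd ""
  rw [score, sum_if_self est.keys hnd jug hj]
  have hmm : est.keys.map (fun j => contrib (est.getD j "") (est.getD jug ""))
      = (est.values.map (fun s => contrib s (est.getD jug ""))) := by
    rw [hv, List.map_map]
    rfl
  rw [hmm, sum_contrib]
  set sj := est.getD jug "" with hsj
  by_cases b1 : sj = valienteStr
  · rw [b1]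
    have c1 : contrib valienteStr valienteStr = -5 := by decide
    have c2 : contrib gallinaStr valienteStr = 10 := by decide
    rw [if_pos rfl, c1, c2]
    ring
  · by_cases b2 : sj = gallinaStr
    · rw [b2]
      have hvg : ¬ (gallinaStr = valienteStr) := by decide
      have c1 : contrib valienteStr gallinaStr = -15 := by decide
      have c2 : contrib gallinaStr gallinaStr = -10 := by decide
      rw [if_neg hvg, if_pos rfl, c1, c2]
      ring
    · have c1 : contrib valienteStr sj = 0 := by
        have hvg : valienteStr ≠ gallinaStr := by decide
        simp [contrib, b1, b2, hvg]
      have c2 : contrib gallinaStr sj = 0 := by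
        have hgv : gallinaStr ≠ valienteStr := by decide
        simp [contrib, b1, b2, hgv]
      have c3 : contrib sj sj = 0 := by simp [contrib, b1, b2]
      rw [if_neg b1, if_neg b2, c1, c2, c3]
      ring

theorem main_eq (estrategias : List (String × String)) :
    torneo_de_gallinas estrategias = torneo_de_gallinas_alt estrategias := by
  have hnd := PySem.Dict.nodup_keys_ofList (κ := String) (ν := String) estrategias
  have hA : torneo_de_gallinas estrategias =
      ((PySem.Dict.ofList estrategias).keys.foldl
        (ostep (PySem.Dict.ofList estrategias)) PySem.Dict.empty).items := rfl
  rw [hA, outer_fold _ _ _ (by simp [PySem.Dict.keys_empty]) hnd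
    (by simp [PySem.Dict.keys_empty])]
  simp only [torneo_de_gallinas_alt]
  rw [PySem.Dict.items_eq_map_keys _ hnd "", List.map_map]
  have : PySem.Dict.empty.items = ([] : List (String × Int)) := rfl
  rw [this, List.nil_append]
  apply List.map_congr_left
  intro jug hj
  simp only [Function.comp]
  rw [score_closed _ hnd jug hj]

-- ===== VERDICT (by name: the statement is the Claim_ definition above) =====
theorem torneo_de_gallinas_spec : Claim_equal_torneo_de_gallinas := by
  intro estrategias _
  show torneo_de_gallinas estrategias = torneo_de_gallinas_alt estrategias
  exact main_eq estrategias
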